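-- pv_equiv track=rewrite | github.com/moon-123/ScoreScanning | functions.py | count_pixels_part
-- ===== SOURCE A (Python) =====
-- def count_pixels_part(image, area_top, area_bot, area_col):
--     cnt = 0
--     flag = False
--     for row in range(area_top, area_bot):
--         if not flag and image[row][area_col] == 255:
--             flag = True
--             cnt += 1
--         elif flag and image[row][area_col] == 0:
--             flag = False
--     return cnt
-- ===== SOURCE B (Python) =====
-- def count_pixels_part(image, area_top, area_bot, area_col):
--     vals = [image[r][area_col] for r in range(area_top, area_bot)
--             if image[r][area_col] in (0, 255)]
--     whites = vals.count(255)
--     doubles = sum(1 for a, b in zip(vals, vals[1:]) if a == 255 and b == 255)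
--     return whites - doubles
-- ===== Notes on version B (the rewrite author's own statement) =====
-- stated objective: alternative
-- what changed: B replaces A's stateful flag automaton with a counting identity: after filtering the column to its 0/255 values, the number of white runs equals the count of 255 entries minus the count of adjacent (255,255) pairs, computed with count and zip instead of any per-step state.
import Mathlib
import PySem

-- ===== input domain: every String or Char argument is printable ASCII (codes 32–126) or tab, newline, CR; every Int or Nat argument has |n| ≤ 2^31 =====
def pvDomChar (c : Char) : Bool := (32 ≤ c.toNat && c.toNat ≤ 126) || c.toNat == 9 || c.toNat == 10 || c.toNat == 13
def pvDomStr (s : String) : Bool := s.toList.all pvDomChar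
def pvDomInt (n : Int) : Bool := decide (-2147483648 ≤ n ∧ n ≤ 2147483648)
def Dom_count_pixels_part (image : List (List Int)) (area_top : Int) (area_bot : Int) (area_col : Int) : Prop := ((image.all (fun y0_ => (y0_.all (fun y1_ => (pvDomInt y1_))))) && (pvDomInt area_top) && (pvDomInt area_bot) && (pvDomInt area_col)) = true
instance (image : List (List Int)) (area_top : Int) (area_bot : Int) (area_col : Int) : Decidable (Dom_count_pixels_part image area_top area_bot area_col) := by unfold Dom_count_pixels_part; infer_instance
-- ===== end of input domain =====

-- B replaces A's stateful flag automaton by a counting identity on the filtered 0/255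
-- column values: #white runs = #255 entries - #adjacent (255,255) pairs (alternative).

-- ===== PORT A =====
def cppStepA (image : List (List Int)) (area_col : Int) (s : Int × Bool) (r : Int) : Int × Bool :=
  match PySem.List.pyGet? image r with
  | none => s
  | some row =>
    match PySem.List.pyGet? row area_col with
    | none => s
    | some v =>
      if s.2 = false ∧ v = 255 then (s.1 + 1, true)
      else if s.2 = true ∧ v = 0 then (s.1, false)
      else s

def count_pixels_part (image : List (List Int)) (area_top : Int) (area_bot : Int) (area_col : Int) : Int :=
  ((PySem.List.pyRange area_top area_bot 1).foldl (cppStepA image area_col) (0, false)).1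

-- ===== PORT B =====
-- the list-comprehension extraction: image[row][area_col] when it is 0 or 255
def cppVal (image : List (List Int)) (area_col : Int) (r : Int) : Option Int :=
  match PySem.List.pyGet? image r with
  | none => none
  | some row =>
    match PySem.List.pyGet? row area_col with
    | none => none
    | some v => if v = 0 ∨ v = 255 then some v else none

def count_pixels_part_alt (image : List (List Int)) (area_top : Int) (area_bot : Int) (area_col : Int) : Int :=
  let vals := (PySem.List.pyRange area_top area_bot 1).filterMap (cppVal image area_col)
  let whites : Int := PySem.List.count vals 255
  let doubles : Int := ((vals.zip (vals.drop 1)).countP (fun p => p.1 == 255 && p.2 == 255) : Nat)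
  whites - doubles

-- ===== PRECONDITION & SPEC =====
-- Pre_: the range [area_top, area_bot) is empty, or it lies within the valid
-- (possibly negative) row indices of image and area_col is a valid index into every
-- visited row (Python A raises IndexError otherwise).
def cppPreRows (rows : List (List Int)) (i : Int) (n : Int) (top : Int) (bot : Int) (col : Int) : Bool :=
  match rows with
  | [] => true
  | row :: rest =>
      (if (top ≤ i ∧ i < bot) ∨ (top ≤ i - n ∧ i - n < bot) then
         decide (-(row.length : Int) ≤ col ∧ col < (row.length : Int))
       else true) && cppPreRows rest (i + 1) n top bot col

def cppPreB (image : List (List Int)) (area_top : Int) (area_bot : Int) (area_col : Int) : Bool :=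
  decide (area_bot ≤ area_top) ||
  (decide (-(image.length : Int) ≤ area_top) && decide (area_bot ≤ (image.length : Int)) &&
   cppPreRows image 0 (image.length : Int) area_top area_bot area_col)

def Pre_count_pixels_part (image : List (List Int)) (area_top : Int) (area_bot : Int) (area_col : Int) : Prop :=
  cppPreB image area_top area_bot area_col = true
instance (image : List (List Int)) (area_top : Int) (area_bot : Int) (area_col : Int) : Decidable (Pre_count_pixels_part image area_top area_bot area_col) := by unfold Pre_count_pixels_part; infer_instance

def pvWitness_count_pixels_part : List (List Int) × Int × Int × Int :=
  ([[255, 0], [10, 0], [255, 255], [0, 0]], 0, 4, 0)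

def Spec_count_pixels_part (image : List (List Int)) (area_top : Int) (area_bot : Int) (area_col : Int) (out : Int) : Prop := out = count_pixels_part_alt image area_top area_bot area_col
instance (image : List (List Int)) (area_top : Int) (area_bot : Int) (area_col : Int) (out : Int) : Decidable (Spec_count_pixels_part image area_top area_bot area_col out) := by unfold Spec_count_pixels_part; infer_instance

-- ===== CLAIM (what is proved, stated in full; the proofs are below) =====
def Claim_equal_count_pixels_part : Prop := ∀ (image : List (List Int)) (area_top : Int) (area_bot : Int) (area_col : Int), Dom_count_pixels_part image area_top area_bot area_col → Pre_count_pixels_part image area_top area_bot area_col → Spec_count_pixels_part image area_top area_bot area_col (count_pixels_part image area_top area_bot area_col)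

-- ===== LEMMAS AND PROOFS =====

-- A's automaton step, restricted to the kept values (used only in the proofs).
def cppG (s : Int × Bool) (v : Int) : Int × Bool :=
  if s.2 = false ∧ v = 255 then (s.1 + 1, true)
  else if s.2 = true ∧ v = 0 then (s.1, false)
  else s

-- A's fold over row indices equals the same automaton folded over the kept values.
theorem cpp_rows (image : List (List Int)) (area_col : Int) :
    ∀ (rs : List Int) (s : Int × Bool),
      rs.foldl (cppStepA image area_col) s
        = (rs.filterMap (cppVal image area_col)).foldl cppG s := by
  intro rs
  induction rs with
  | nil => intro s; rfl
  | cons r rs ih =>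
    intro s
    rw [List.foldl_cons, List.filterMap_cons]
    cases hrow : PySem.List.pyGet? image r with
    | none =>
      rw [show cppStepA image area_col s r = s from by simp [cppStepA, hrow],
          show cppVal image area_col r = none from by simp [cppVal, hrow]]
      exact ih s
    | some row =>
      cases hv : PySem.List.pyGet? row area_col with
      | none =>
        rw [show cppStepA image area_col s r = s from by simp [cppStepA, hrow, hv],
            show cppVal image area_col r = none from by simp [cppVal, hrow, hv]]
        exact ih s
      | some v =>
        by_cases hk : v = 0 ∨ v = 255
        · rw [show cppVal image area_col r = some v from by simp [cppVal, hrow, hv, hk],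
              List.foldl_cons,
              show cppStepA image area_col s r = cppG s v from by simp [cppStepA, cppG, hrow, hv]]
          exact ih _
        · rw [show cppVal image area_col r = none from by simp [cppVal, hrow, hv, hk],
              show cppStepA image area_col s r = s from by
                rw [not_or] at hk
                simp [cppStepA, hrow, hv, hk.1, hk.2]]
          exact ih s

-- Counting identity: on a 0/255 list, the automaton's count from (c, flag) is
-- c + (#255) - (#adjacent 255/255 pairs) - (1 if flag and the list starts with 255).
theorem cpp_count (vals : List Int) :
    ∀ (c : Int) (flag : Bool),
      (∀ v ∈ vals, v = 0 ∨ v = 255) →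
      (vals.foldl cppG (c, flag)).1
        = c + (PySem.List.count vals 255 : Int)
            - ((vals.zip (vals.drop 1)).countP (fun p => p.1 == 255 && p.2 == 255) : Nat)
            - (if flag = true ∧ vals.head? = some 255 then 1 else 0) := by
  induction vals with
  | nil => intro c flag _; simp [PySem.List.count]
  | cons v vs ih =>
    intro c flag hall
    have hv := hall v List.mem_cons_self
    have hvs : ∀ w ∈ vs, w = 0 ∨ w = 255 := fun w hw => hall w (List.mem_cons_of_mem _ hw)
    have hzip : ((v :: vs).zip ((v :: vs).drop 1)).countP
          (fun p => p.1 == 255 && p.2 == 255)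
        = (vs.zip (vs.drop 1)).countP (fun p => p.1 == 255 && p.2 == 255)
          + (if v = 255 ∧ vs.head? = some 255 then 1 else 0) := by
      cases vs with
      | nil => simp
      | cons w t =>
        simp only [List.drop_succ_cons, List.drop_zero, List.zip_cons_cons,
          List.countP_cons, List.head?_cons]
        by_cases hv' : v = 255 <;> by_cases hw : w = 255 <;> simp [hv', hw]
    rcases hv with h0 | h255
    · subst h0
      have step : cppG (c, flag) 0 = (c, false) := by
        cases flag <;> simp [cppG]
      rw [List.foldl_cons, step, ih c false hvs, hzip]
      simp [PySem.List.count]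
    · subst h255
      cases flag with
      | false =>
        rw [List.foldl_cons, show cppG (c, false) 255 = (c + 1, true) from by simp [cppG],
            ih (c + 1) true hvs, hzip]
        simp only [PySem.List.count]
        by_cases hh : vs.head? = some 255 <;> simp [hh] <;> ring
      | true =>
        rw [List.foldl_cons, show cppG (c, true) 255 = (c, true) from by simp [cppG],
            ih c true hvs, hzip]
        simp only [PySem.List.count]
        by_cases hh : vs.head? = some 255 <;> simp [hh] <;> ring

-- every kept value is 0 or 255
theorem cpp_vals_mem (image : List (List Int)) (area_col : Int) (rs : List Int) :
    ∀ v ∈ rs.filterMap (cppVal image area_col), v = 0 ∨ v = 255 := by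
  intro v hv
  rcases List.mem_filterMap.1 hv with ⟨r, _, hr⟩
  unfold cppVal at hr
  cases h1 : PySem.List.pyGet? image r with
  | none => simp [h1] at hr
  | some row =>
    cases h2 : PySem.List.pyGet? row area_col with
    | none => simp [h1, h2] at hr
    | some w =>
      by_cases hk : w = 0 ∨ w = 255
      · rw [h1] at hr; simp [h2, hk] at hr; omega
      · rw [h1] at hr; simp [h2, hk] at hr

-- ===== VERDICT (by name: the statement is the Claim_ definition above) =====
theorem count_pixels_part_spec : Claim_equal_count_pixels_part := by
  intro image area_top area_bot area_col _ _
  unfold Spec_count_pixels_part count_pixels_part count_pixels_part_alt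
  rw [cpp_rows, cpp_count _ 0 false (cpp_vals_mem image area_col _)]
  simp
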